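-- pv_equiv track=rewrite | github.com/pypi-data/pypi-mirror-60 | packages/any-roman/any_roman-0.0.4.tar.gz/any_roman-0.0.4/any_roman/any_roman.py | get_thousand_count
-- ===== SOURCE A (Python) =====
-- def get_thousand_count(input_number: int) -> (int, int, int):
--     """
--     Returns three integers defining the number, number of thousands and remainder
--
--     >>> get_thousand_count(999)
--     (999, 0, 0)
--     >>> get_thousand_count(1001)
--     (1, 1, 1)
--     >>> get_thousand_count(2000002)
--     (2, 2, 2)
--     """
--     num = input_number
--     k = 0
--     while num >= 1000:
--         k += 1
--         num //= 1000
--     remainder = input_number - (num * 1000 ** k)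
--     return num, k, remainder
-- ===== SOURCE B (Python) =====
-- def get_thousand_count(input_number: int) -> (int, int, int):
--     if input_number < 1000:
--         return input_number, 0, 0
--     k = (len(str(input_number)) - 1) // 3
--     num = input_number // 1000 ** k
--     return num, k, input_number - num * 1000 ** k
-- ===== Notes on version B (the rewrite author's own statement) =====
-- stated objective: alternative
-- what changed: Replaces the repeated-division loop with a closed-form thousand-count k = (len(str(n))-1)//3 derived from the decimal digit count, plus one division by 1000**k.
import Mathlib
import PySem

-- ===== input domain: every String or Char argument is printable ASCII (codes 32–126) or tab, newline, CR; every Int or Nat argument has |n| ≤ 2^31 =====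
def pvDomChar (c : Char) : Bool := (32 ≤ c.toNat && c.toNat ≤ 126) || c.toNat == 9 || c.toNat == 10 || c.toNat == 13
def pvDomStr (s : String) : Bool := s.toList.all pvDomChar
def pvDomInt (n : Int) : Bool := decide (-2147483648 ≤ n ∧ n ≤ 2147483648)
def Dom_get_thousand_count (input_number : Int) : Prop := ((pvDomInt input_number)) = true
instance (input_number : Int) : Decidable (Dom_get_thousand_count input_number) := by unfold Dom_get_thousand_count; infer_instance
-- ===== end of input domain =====

-- B replaces A's repeated-division loop by a closed-form thousand-count k = (len(str(n))-1)//3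
-- from the decimal digit count (objective: alternative algorithm, same cost in practice).


-- ===== PORT A =====
-- while num >= 1000: k += 1; num //= 1000   (num stays ≥ 1 once ≥ 1000, so num.toNat strictly drops)
def pvLoopA (num k : Int) : Int × Int :=
  if 1000 ≤ num then pvLoopA (PySem.Int.floordiv num 1000) (k + 1) else (num, k)
termination_by num.toNat
decreasing_by
  rw [PySem.Int.floordiv_eq_ediv_of_pos (by norm_num : (0:Int) < 1000)]
  omega

def get_thousand_count (input_number : Int) : Int × Int × Int :=
  let r := pvLoopA input_number 0
  -- 1000 ** k with k ≥ 0 always here (k counts loop iterations): ported as 1000 ^ k.toNat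
  (r.1, r.2, input_number - r.1 * 1000 ^ r.2.toNat)

-- ===== PORT B =====
def get_thousand_count_alt (input_number : Int) : Int × Int × Int :=
  if input_number < 1000 then (input_number, 0, 0)
  else
    let k := PySem.Int.floordiv (PySem.Str.len (PySem.Int.toStr input_number) - 1) 3
    -- 1000 ** k with k ≥ 0 (at least one digit): ported as 1000 ^ k.toNat
    let num := PySem.Int.floordiv input_number (1000 ^ k.toNat)
    (num, k, input_number - num * 1000 ^ k.toNat)

-- ===== PRECONDITION & SPEC =====
def Spec_get_thousand_count (input_number : Int) (out : Int × Int × Int) : Prop := out = get_thousand_count_alt input_number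
instance (input_number : Int) (out : Int × Int × Int) : Decidable (Spec_get_thousand_count input_number out) := by unfold Spec_get_thousand_count; infer_instance

-- ===== CLAIM (what is proved, stated in full; the proofs are below) =====
def Claim_equal_get_thousand_count : Prop := ∀ (input_number : Int), Dom_get_thousand_count input_number → Spec_get_thousand_count input_number (get_thousand_count input_number)

-- ===== LEMMAS AND PROOFS =====

-- length of Nat.toDigits 10 is the digit count (log₁₀ + 1)
theorem pv_toDigitsCore_len (f : Nat) : ∀ (n : Nat) (l : List Char), 0 < n → n ≤ f →
    (Nat.toDigitsCore 10 f n l).length = Nat.log 10 n + 1 + l.length := by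
  induction f with
  | zero => intro n l h1 h2; omega
  | succ f ih =>
    intro n l h1 h2
    simp only [Nat.toDigitsCore]
    by_cases h : n / 10 = 0
    · rw [if_pos h]
      have hlt : n < 10 := by rcases Nat.div_eq_zero_iff.mp h with h' | h' <;> omega
      have : Nat.log 10 n = 0 := Nat.log_eq_zero_iff.mpr (Or.inl hlt)
      simp [this]
      omega
    · rw [if_neg h]
      have h10 : 10 ≤ n := by
        by_contra hc; exact h (Nat.div_eq_zero_iff.mpr (Or.inr (by omega)))
      have hlog1 : 1 ≤ Nat.log 10 n := Nat.le_log_of_pow_le (by norm_num) (by simpa using h10)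
      rw [ih (n / 10) _ (Nat.pos_of_ne_zero h) (by omega)]
      rw [Nat.log_div_base]
      simp only [List.length_cons]
      omega

theorem pv_toDigits_len (n : Nat) (h : 0 < n) :
    (Nat.toDigits 10 n).length = Nat.log 10 n + 1 := by
  have := pv_toDigitsCore_len (n + 1) n [] h (by omega)
  simpa [Nat.toDigits] using this

-- stop and step equations for A's loop
theorem pvLoopA_stop (num k : Int) (h : num < 1000) : pvLoopA num k = (num, k) := by
  rw [pvLoopA, if_neg (by omega)]

theorem pvLoopA_step (num k : Int) (h : 1000 ≤ num) :
    pvLoopA num k = pvLoopA (num / 1000) (k + 1) := by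
  rw [pvLoopA, if_pos h, PySem.Int.floordiv_eq_ediv_of_pos (by norm_num : (0:Int) < 1000)]

-- B's branch for n ≥ 1000, with k written via Nat.log
theorem pv_alt_eval (n : Int) (hn : 1000 ≤ n) :
    get_thousand_count_alt n =
      (n / 1000 ^ (Nat.log 10 n.toNat / 3), ((Nat.log 10 n.toNat / 3 : Nat) : Int),
        n - n / 1000 ^ (Nat.log 10 n.toNat / 3) * 1000 ^ (Nat.log 10 n.toNat / 3)) := by
  have hL : PySem.Str.len (PySem.Int.toStr n) = ((Nat.log 10 n.toNat + 1 : Nat) : Int) := by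
    rw [PySem.Str.len_eq, PySem.Int.toList_toStr]
    have : PySem.Int.toChars n = Nat.toDigits 10 n.toNat := by
      simp [PySem.Int.toChars, show ¬ n < 0 by omega]
    rw [this, pv_toDigits_len n.toNat (by omega)]
  have hk : PySem.Int.floordiv (PySem.Str.len (PySem.Int.toStr n) - 1) 3
      = ((Nat.log 10 n.toNat / 3 : Nat) : Int) := by
    rw [hL]
    have : ((Nat.log 10 n.toNat + 1 : Nat) : Int) - 1 = ((Nat.log 10 n.toNat : Nat) : Int) := by
      push_cast; ring
    rw [this, show (3:Int) = ((3:Nat):Int) from rfl, PySem.Int.floordiv_natCast]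
  simp only [get_thousand_count_alt, if_neg (by omega : ¬ n < 1000), hk,
    Int.toNat_natCast, PySem.Int.floordiv_eq_ediv_of_pos (by positivity : (0:Int) < 1000 ^ (Nat.log 10 n.toNat / 3))]

-- ===== VERDICT (by name: the statement is the Claim_ definition above) =====
theorem get_thousand_count_spec : Claim_equal_get_thousand_count := by
  intro n hd
  have hdom : -2147483648 ≤ n ∧ n ≤ 2147483648 := by
    simpa [Dom_get_thousand_count, pvDomInt] using hd
  unfold Spec_get_thousand_count
  by_cases h0 : n < 1000
  · simp [get_thousand_count, get_thousand_count_alt, pvLoopA_stop n 0 h0, h0]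
  · rw [not_lt] at h0
    have hlog_lo : 3 ≤ Nat.log 10 n.toNat :=
      Nat.le_log_of_pow_le (by norm_num) (by omega)
    rw [pv_alt_eval n h0]
    by_cases h1 : n < 1000000
    · have hlog_hi : Nat.log 10 n.toNat < 6 :=
        Nat.log_lt_of_lt_pow (by omega) (by omega)
      have hk : Nat.log 10 n.toNat / 3 = 1 := by omega
      have hA : pvLoopA n 0 = (n / 1000, 1) := by
        rw [pvLoopA_step n 0 h0, pvLoopA_stop _ _ (by omega)]
        norm_num
      rw [hk]
      simp only [get_thousand_count, hA, Prod.mk.injEq]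
      norm_num
    · rw [not_lt] at h1
      by_cases h2 : n < 1000000000
      · have hlog_hi : Nat.log 10 n.toNat < 9 :=
          Nat.log_lt_of_lt_pow (by omega) (by omega)
        have hlog_lo2 : 6 ≤ Nat.log 10 n.toNat :=
          Nat.le_log_of_pow_le (by norm_num) (by omega)
        have hk : Nat.log 10 n.toNat / 3 = 2 := by omega
        have hA : pvLoopA n 0 = (n / 1000 / 1000, 2) := by
          rw [pvLoopA_step n 0 h0, pvLoopA_step _ _ (by omega),
            pvLoopA_stop _ _ (by omega)]
          norm_num
        rw [hk]
        simp only [get_thousand_count, hA, Prod.mk.injEq]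
        norm_num
        constructor
        · omega
        · have h6 : n / 1000 / 1000 = n / 1000000 := by omega
          rw [h6]
          norm_num
          exact Or.inl (by decide)
      · rw [not_lt] at h2
        have hlog_hi : Nat.log 10 n.toNat < 10 :=
          Nat.log_lt_of_lt_pow (by omega) (by omega)
        have hlog_lo3 : 9 ≤ Nat.log 10 n.toNat :=
          Nat.le_log_of_pow_le (by norm_num) (by omega)
        have hk : Nat.log 10 n.toNat / 3 = 3 := by omega
        have hA : pvLoopA n 0 = (n / 1000 / 1000 / 1000, 3) := by
          rw [pvLoopA_step n 0 h0, pvLoopA_step _ _ (by omega),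
            pvLoopA_step _ _ (by omega), pvLoopA_stop _ _ (by omega)]
          norm_num
        rw [hk]
        simp only [get_thousand_count, hA, Prod.mk.injEq]
        norm_num
        constructor
        · omega
        · have h9 : n / 1000 / 1000 / 1000 = n / 1000000000 := by omega
          rw [h9]
          norm_num
          exact Or.inl (by decide)
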